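-- pv_equiv track=rewrite | github.com/AgustinCB/contests | adventOfCode2020/day17.py | neighbors_4d
-- ===== SOURCE A (Python) =====
-- from typing import Tuple, Set, Union, Callable
--
-- Point = Tuple[int, int, int]
--
-- Point4d = Tuple[int, int, int, int]
--
-- def neighbors_4d(point: Point4d) -> Set[Point4d]:
--     point_3d = (point[0], point[1], point[2])
--     layer_template = neighbors(point_3d).union({point_3d})
--     result = set()
--     for w_offset in [-1, 0, 1]:
--         for p in layer_template:
--             result.add((p[0], p[1], p[2], point[3] + w_offset))
--     return result - {point}
--
-- def neighbors(point: Point) -> Set[Point]: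
--     return {
--         (point[0] - 1, point[1], point[2]),
--         (point[0] + 1, point[1], point[2]),
--         (point[0], point[1] - 1, point[2]),
--         (point[0], point[1] + 1, point[2]),
--         (point[0] - 1, point[1] + 1, point[2]),
--         (point[0] + 1, point[1] + 1, point[2]),
--         (point[0] - 1, point[1] - 1, point[2]),
--         (point[0] + 1, point[1] - 1, point[2]),
--         (point[0], point[1], point[2] + 1),
--         (point[0] - 1, point[1], point[2] + 1),
--         (point[0] + 1, point[1], point[2] + 1),
--         (point[0], point[1] - 1, point[2] + 1),
--         (point[0], point[1] + 1, point[2] + 1),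
--         (point[0] - 1, point[1] + 1, point[2] + 1),
--         (point[0] + 1, point[1] + 1, point[2] + 1),
--         (point[0] - 1, point[1] - 1, point[2] + 1),
--         (point[0] + 1, point[1] - 1, point[2] + 1),
--         (point[0], point[1], point[2] - 1),
--         (point[0] - 1, point[1], point[2] - 1),
--         (point[0] + 1, point[1], point[2] - 1),
--         (point[0], point[1] - 1, point[2] - 1),
--         (point[0], point[1] + 1, point[2] - 1),
--         (point[0] - 1, point[1] + 1, point[2] - 1),
--         (point[0] + 1, point[1] + 1, point[2] - 1),
--         (point[0] - 1, point[1] - 1, point[2] - 1),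
--         (point[0] + 1, point[1] - 1, point[2] - 1),
--     }
-- ===== SOURCE B (Python) =====
-- def neighbors_4d(point):
--     x, y, z, w = point
--     return {
--         (x + dx, y + dy, z + dz, w + dw)
--         for dx in (-1, 0, 1)
--         for dy in (-1, 0, 1)
--         for dz in (-1, 0, 1)
--         for dw in (-1, 0, 1)
--         if (dx, dy, dz, dw) != (0, 0, 0, 0)
--     }
-- ===== Notes on version B (the rewrite author's own statement) =====
-- stated objective: simpler
-- what changed: A builds the 26-neighbour 3D cube plus the centre, copies that layer across the three w offsets, and finally subtracts the point itself; B enumerates the 80 non-zero 4D offsets directly in one comprehension over dx,dy,dz,dw and translates the point by each.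
import Mathlib
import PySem

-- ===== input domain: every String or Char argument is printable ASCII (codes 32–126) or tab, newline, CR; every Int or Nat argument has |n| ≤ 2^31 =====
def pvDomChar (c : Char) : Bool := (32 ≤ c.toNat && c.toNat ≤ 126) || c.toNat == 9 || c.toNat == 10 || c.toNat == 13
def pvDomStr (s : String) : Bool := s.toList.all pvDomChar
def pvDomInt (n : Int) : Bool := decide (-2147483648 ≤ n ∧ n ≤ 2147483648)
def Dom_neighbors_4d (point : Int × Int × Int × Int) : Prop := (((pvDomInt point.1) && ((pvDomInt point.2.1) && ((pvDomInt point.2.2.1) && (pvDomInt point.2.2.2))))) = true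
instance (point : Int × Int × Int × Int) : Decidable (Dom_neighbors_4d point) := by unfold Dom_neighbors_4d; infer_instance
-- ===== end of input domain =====

-- B replaces A's two-stage build (3D neighbour cube + centre, layered across w, then centre removed)
-- by one direct sweep over the 80 non-zero 4D offsets (objective: simpler).
-- Both Pythons return a SET; Python's set iteration order is not modelled (PYSEM), so both ports
-- return the canonical representation of that set: its elements sorted by pvKey, a key that is
-- injective on any set of points around a common base point (sorted with such a key is an exact
-- set consumption per PYSEM).

-- canonical-representation helper shared by both ports (not part of either algorithm)
def pvKey (p : Int × Int × Int × Int) : Int := ((p.1 * 4 + p.2.1) * 4 + p.2.2.1) * 4 + p.2.2.2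

def pvCanon (s : PySem.Set (Int × Int × Int × Int)) : List (Int × Int × Int × Int) :=
  PySem.List.sorted s pvKey false

-- ===== PORT A =====
-- the 26-element set literal of neighbors(point), in A's literal order
def pvNeighbors (point : Int × Int × Int) : PySem.Set (Int × Int × Int) :=
  PySem.Set.ofList
    [ (point.1 - 1, point.2.1, point.2.2)
    , (point.1 + 1, point.2.1, point.2.2)
    , (point.1, point.2.1 - 1, point.2.2)
    , (point.1, point.2.1 + 1, point.2.2)
    , (point.1 - 1, point.2.1 + 1, point.2.2)
    , (point.1 + 1, point.2.1 + 1, point.2.2)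
    , (point.1 - 1, point.2.1 - 1, point.2.2)
    , (point.1 + 1, point.2.1 - 1, point.2.2)
    , (point.1, point.2.1, point.2.2 + 1)
    , (point.1 - 1, point.2.1, point.2.2 + 1)
    , (point.1 + 1, point.2.1, point.2.2 + 1)
    , (point.1, point.2.1 - 1, point.2.2 + 1)
    , (point.1, point.2.1 + 1, point.2.2 + 1)
    , (point.1 - 1, point.2.1 + 1, point.2.2 + 1)
    , (point.1 + 1, point.2.1 + 1, point.2.2 + 1)
    , (point.1 - 1, point.2.1 - 1, point.2.2 + 1)
    , (point.1 + 1, point.2.1 - 1, point.2.2 + 1)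
    , (point.1, point.2.1, point.2.2 - 1)
    , (point.1 - 1, point.2.1, point.2.2 - 1)
    , (point.1 + 1, point.2.1, point.2.2 - 1)
    , (point.1, point.2.1 - 1, point.2.2 - 1)
    , (point.1, point.2.1 + 1, point.2.2 - 1)
    , (point.1 - 1, point.2.1 + 1, point.2.2 - 1)
    , (point.1 + 1, point.2.1 + 1, point.2.2 - 1)
    , (point.1 - 1, point.2.1 - 1, point.2.2 - 1)
    , (point.1 + 1, point.2.1 - 1, point.2.2 - 1) ]

def neighbors_4d (point : Int × Int × Int × Int) : List (Int × Int × Int × Int) :=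
  let point_3d : Int × Int × Int := (point.1, point.2.1, point.2.2.1)
  let layer_template := PySem.Set.union (pvNeighbors point_3d) (PySem.Set.ofList [point_3d])
  let result := [(-1 : Int), 0, 1].foldl (fun res w_offset =>
      layer_template.foldl (fun r p => PySem.Set.add r (p.1, p.2.1, p.2.2, point.2.2.2 + w_offset)) res)
    PySem.Set.empty
  pvCanon (PySem.Set.diff result [point])

-- ===== PORT B =====
def neighbors_4d_alt (point : Int × Int × Int × Int) : List (Int × Int × Int × Int) :=
  let x := point.1
  let y := point.2.1
  let z := point.2.2.1
  let w := point.2.2.2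
  pvCanon (PySem.Set.ofList (
    [(-1 : Int), 0, 1].flatMap fun dx =>
    [(-1 : Int), 0, 1].flatMap fun dy =>
    [(-1 : Int), 0, 1].flatMap fun dz =>
    [(-1 : Int), 0, 1].flatMap fun dw =>
    if (dx, dy, dz, dw) ≠ ((0 : Int), (0 : Int), (0 : Int), (0 : Int))
    then [(x + dx, y + dy, z + dz, w + dw)] else []))

-- ===== PRECONDITION & SPEC =====
def Spec_neighbors_4d (point : Int × Int × Int × Int) (out : List (Int × Int × Int × Int)) : Prop := out = neighbors_4d_alt point
instance (point : Int × Int × Int × Int) (out : List (Int × Int × Int × Int)) : Decidable (Spec_neighbors_4d point out) := by unfold Spec_neighbors_4d; infer_instance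

-- ===== CLAIM (what is proved, stated in full; the proofs are below) =====
def Claim_equal_neighbors_4d : Prop := ∀ (point : Int × Int × Int × Int), Dom_neighbors_4d point → Spec_neighbors_4d point (neighbors_4d point)

-- ===== LEMMAS AND PROOFS =====

-- translate an offset quadruple by the base point
def pvF (pt : Int × Int × Int × Int) (o : Int × Int × Int × Int) : Int × Int × Int × Int :=
  (pt.1 + o.1, pt.2.1 + o.2.1, pt.2.2.1 + o.2.2.1, pt.2.2.2 + o.2.2.2)

theorem pvF_inj (pt : Int × Int × Int × Int) : Function.Injective (pvF pt) := by
  rintro ⟨a1, b1, c1, d1⟩ ⟨a2, b2, c2, d2⟩ h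
  simp only [pvF, Prod.mk.injEq] at h ⊢
  omega

-- the 80 offsets in the order B enumerates them: lexicographically increasing
def pvC80 : List (Int × Int × Int × Int) := [(-1, -1, -1, -1), (-1, -1, -1, 0), (-1, -1, -1, 1), (-1, -1, 0, -1), (-1, -1, 0, 0), (-1, -1, 0, 1), (-1, -1, 1, -1), (-1, -1, 1, 0), (-1, -1, 1, 1), (-1, 0, -1, -1), (-1, 0, -1, 0), (-1, 0, -1, 1), (-1, 0, 0, -1), (-1, 0, 0, 0), (-1, 0, 0, 1), (-1, 0, 1, -1), (-1, 0, 1, 0), (-1, 0, 1, 1), (-1, 1, -1, -1), (-1, 1, -1, 0), (-1, 1, -1, 1), (-1, 1, 0, -1), (-1, 1, 0, 0), (-1, 1, 0, 1), (-1, 1, 1, -1), (-1, 1, 1, 0), (-1, 1, 1, 1), (0, -1, -1, -1), (0, -1, -1, 0), (0, -1, -1, 1), (0, -1, 0, -1), (0, -1, 0, 0), (0, -1, 0, 1), (0, -1, 1, -1), (0, -1, 1, 0), (0, -1, 1, 1), (0, 0, -1, -1), (0, 0, -1, 0), (0, 0, -1, 1), (0, 0, 0, -1), (0, 0, 0, 1),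 (0, 0, 1, -1), (0, 0, 1, 0), (0, 0, 1, 1), (0, 1, -1, -1), (0, 1, -1, 0), (0, 1, -1, 1), (0, 1, 0, -1), (0, 1, 0, 0), (0, 1, 0, 1), (0, 1, 1, -1), (0, 1, 1, 0), (0, 1, 1, 1), (1, -1, -1, -1), (1, -1, -1, 0), (1, -1, -1, 1), (1, -1, 0, -1), (1, -1, 0, 0), (1, -1, 0, 1), (1, -1, 1, -1), (1, -1, 1, 0), (1, -1, 1, 1), (1, 0, -1, -1), (1, 0, -1, 0), (1, 0, -1, 1), (1, 0, 0, -1), (1, 0, 0, 0), (1, 0, 0, 1), (1, 0, 1, -1), (1, 0, 1, 0), (1, 0, 1, 1), (1, 1, -1, -1), (1, 1, -1, 0), (1, 1, -1, 1), (1, 1, 0, -1), (1, 1, 0, 0), (1, 1, 0, 1), (1, 1, 1, -1), (1, 1, 1, 0), (1, 1, 1, 1)]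

-- the 80 offsets in the order A inserts them: per w-layer, A's literal 3D order + centre, minus (0,0,0,0)
def pvOffsA80 : List (Int × Int × Int × Int) := [(-1, 0, 0, -1), (1, 0, 0, -1), (0, -1, 0, -1), (0, 1, 0, -1), (-1, 1, 0, -1), (1, 1, 0, -1), (-1, -1, 0, -1), (1, -1, 0, -1), (0, 0, 1, -1), (-1, 0, 1, -1), (1, 0, 1, -1), (0, -1, 1, -1), (0, 1, 1, -1), (-1, 1, 1, -1), (1, 1, 1, -1), (-1, -1, 1, -1), (1, -1, 1, -1), (0, 0, -1, -1), (-1, 0, -1, -1), (1, 0, -1, -1), (0, -1, -1, -1), (0, 1, -1, -1), (-1, 1, -1, -1), (1, 1, -1, -1), (-1, -1, -1, -1), (1, -1, -1, -1), (0, 0, 0, -1), (-1, 0, 0, 0), (1, 0, 0, 0), (0, -1, 0, 0), (0, 1, 0, 0), (-1, 1, 0, 0), (1, 1, 0, 0), (-1, -1, 0, 0), (1, -1, 0, 0), (0, 0, 1, 0), (-1, 0, 1, 0), (1, 0, 1, 0), (0, -1, 1, 0), (0, 1, 1, 0), (-1, 1, 1, 0), (1, 1, 1, 0), (-1, -1,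 1, 0), (1, -1, 1, 0), (0, 0, -1, 0), (-1, 0, -1, 0), (1, 0, -1, 0), (0, -1, -1, 0), (0, 1, -1, 0), (-1, 1, -1, 0), (1, 1, -1, 0), (-1, -1, -1, 0), (1, -1, -1, 0), (-1, 0, 0, 1), (1, 0, 0, 1), (0, -1, 0, 1), (0, 1, 0, 1), (-1, 1, 0, 1), (1, 1, 0, 1), (-1, -1, 0, 1), (1, -1, 0, 1), (0, 0, 1, 1), (-1, 0, 1, 1), (1, 0, 1, 1), (0, -1, 1, 1), (0, 1, 1, 1), (-1, 1, 1, 1), (1, 1, 1, 1), (-1, -1, 1, 1), (1, -1, 1, 1), (0, 0, -1, 1), (-1, 0, -1, 1), (1, 0, -1, 1), (0, -1, -1, 1), (0, 1, -1, 1), (-1, 1, -1, 1), (1, 1, -1, 1), (-1, -1, -1, 1), (1, -1, -1, 1), (0, 0, 0, 1)]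

-- sorting a translated nodup offset list by pvKey yields the lexicographic order
theorem pvKey_step (pt o1 o2 : Int × Int × Int × Int)
    (h1 : -1 ≤ o1.1 ∧ o1.1 ≤ 1 ∧ -1 ≤ o1.2.1 ∧ o1.2.1 ≤ 1 ∧ -1 ≤ o1.2.2.1 ∧ o1.2.2.1 ≤ 1 ∧ -1 ≤ o1.2.2.2 ∧ o1.2.2.2 ≤ 1)
    (h2 : -1 ≤ o2.1 ∧ o2.1 ≤ 1 ∧ -1 ≤ o2.2.1 ∧ o2.2.1 ≤ 1 ∧ -1 ≤ o2.2.2.1 ∧ o2.2.2.1 ≤ 1 ∧ -1 ≤ o2.2.2.2 ∧ o2.2.2.2 ≤ 1)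
    (hlex : o1.1 < o2.1 ∨ (o1.1 = o2.1 ∧ (o1.2.1 < o2.2.1 ∨ (o1.2.1 = o2.2.1 ∧ (o1.2.2.1 < o2.2.2.1 ∨ (o1.2.2.1 = o2.2.2.1 ∧ o1.2.2.2 < o2.2.2.2)))))) :
    pvKey (pvF pt o1) < pvKey (pvF pt o2) := by
  obtain ⟨a1, b1, c1, d1⟩ := o1
  obtain ⟨a2, b2, c2, d2⟩ := o2
  simp only [pvKey, pvF] at *
  omega

theorem pvCanon_map (pt : Int × Int × Int × Int) (l : List (Int × Int × Int × Int))
    (hperm : pvC80.Perm l) :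
    pvCanon (l.map (pvF pt)) = pvC80.map (pvF pt) := by
  apply PySem.List.sorted_eq_of_perm_of_pairwise_lt
  · exact (hperm.map (pvF pt))
  · rw [List.pairwise_map]
    have hcube : ∀ o ∈ pvC80, -1 ≤ o.1 ∧ o.1 ≤ 1 ∧ -1 ≤ o.2.1 ∧ o.2.1 ≤ 1 ∧ -1 ≤ o.2.2.1 ∧ o.2.2.1 ≤ 1 ∧ -1 ≤ o.2.2.2 ∧ o.2.2.2 ≤ 1 := by decide
    have hlex : pvC80.Pairwise (fun o1 o2 => o1.1 < o2.1 ∨ (o1.1 = o2.1 ∧ (o1.2.1 < o2.2.1 ∨ (o1.2.1 = o2.2.1 ∧ (o1.2.2.1 < o2.2.2.1 ∨ (o1.2.2.1 = o2.2.2.1 ∧ o1.2.2.2 < o2.2.2.2)))))) := by decide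
    exact hlex.imp_of_mem (fun {o1 o2} hm1 hm2 h =>
      pvKey_step pt o1 o2 (hcube o1 hm1) (hcube o2 hm2) h)

-- disjoint offset lists translate to disjoint point lists
theorem pvMap_disjoint (pt : Int × Int × Int × Int) (l1 l0 : List (Int × Int × Int × Int))
    (h : ∀ o ∈ l1, o ∉ l0) : ∀ x ∈ l1.map (pvF pt), x ∉ l0.map (pvF pt) := by
  intro x hx hx0
  obtain ⟨o, ho, rfl⟩ := List.mem_map.mp hx
  obtain ⟨o', ho', heq⟩ := List.mem_map.mp hx0
  exact h o ho (pvF_inj pt heq ▸ ho')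

-- B's comprehension enumerates exactly the translated pvC80
theorem pvB_elems (point : Int × Int × Int × Int) :
    ([(-1 : Int), 0, 1].flatMap fun dx =>
     [(-1 : Int), 0, 1].flatMap fun dy =>
     [(-1 : Int), 0, 1].flatMap fun dz =>
     [(-1 : Int), 0, 1].flatMap fun dw =>
     if (dx, dy, dz, dw) ≠ ((0 : Int), (0 : Int), (0 : Int), (0 : Int))
     then [(point.1 + dx, point.2.1 + dy, point.2.2.1 + dz, point.2.2.2 + dw)] else [])
      = pvC80.map (pvF point) := by
  simp [List.flatMap_cons, pvC80, pvF]

-- A's 26 3D-neighbour offsets, in A's literal order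
def pvOffs26 : List (Int × Int × Int) := [(-1, 0, 0), (1, 0, 0), (0, -1, 0), (0, 1, 0), (-1, 1, 0), (1, 1, 0), (-1, -1, 0), (1, -1, 0), (0, 0, 1), (-1, 0, 1), (1, 0, 1), (0, -1, 1), (0, 1, 1), (-1, 1, 1), (1, 1, 1), (-1, -1, 1), (1, -1, 1), (0, 0, -1), (-1, 0, -1), (1, 0, -1), (0, -1, -1), (0, 1, -1), (-1, 1, -1), (1, 1, -1), (-1, -1, -1), (1, -1, -1)]

def pvOffs27 : List (Int × Int × Int) := pvOffs26 ++ [(0, 0, 0)]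

def pvG (pt : Int × Int × Int × Int) (o : Int × Int × Int) : Int × Int × Int :=
  (pt.1 + o.1, pt.2.1 + o.2.1, pt.2.2.1 + o.2.2)

def pvLift (wo : Int) (o : Int × Int × Int) : Int × Int × Int × Int := (o.1, o.2.1, o.2.2, wo)

theorem pvG_inj (pt : Int × Int × Int × Int) : Function.Injective (pvG pt) := by
  rintro ⟨a1, b1, c1⟩ ⟨a2, b2, c2⟩ h
  simp only [pvG, Prod.mk.injEq] at h ⊢
  omega

theorem pvNeighbors_eq (pt : Int × Int × Int × Int) :
    pvNeighbors (pt.1, pt.2.1, pt.2.2.1) = pvOffs26.map (pvG pt) := by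
  unfold pvNeighbors
  have h : ∀ (l : List (Int × Int × Int)), l = pvOffs26.map (pvG pt) →
      PySem.Set.ofList l = pvOffs26.map (pvG pt) := by
    rintro l rfl
    exact PySem.Set.ofList_eq_self_of_nodup _ ((by decide : pvOffs26.Nodup).map (pvG_inj pt))
  apply h
  simp only [pvOffs26, List.map_cons, List.map_nil, pvG, List.cons.injEq, Prod.mk.injEq, and_true, true_and]
  omega

theorem pvCentre_not_mem (pt : Int × Int × Int × Int) :
    (pt.1, pt.2.1, pt.2.2.1) ∉ pvOffs26.map (pvG pt) := by
  intro h
  obtain ⟨o, ho, heq⟩ := List.mem_map.mp h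
  have h0 : pvG pt o = pvG pt (0, 0, 0) := by
    rw [heq]; simp [pvG]
  rw [pvG_inj pt h0] at ho
  exact (by decide : ((0 : Int), (0 : Int), (0 : Int)) ∉ pvOffs26) ho

theorem pvTemplate_eq (pt : Int × Int × Int × Int) :
    PySem.Set.union (pvNeighbors (pt.1, pt.2.1, pt.2.2.1))
      (PySem.Set.ofList [(pt.1, pt.2.1, pt.2.2.1)]) = pvOffs27.map (pvG pt) := by
  rw [pvNeighbors_eq]
  have hu : PySem.Set.union (pvOffs26.map (pvG pt)) (PySem.Set.ofList [(pt.1, pt.2.1, pt.2.2.1)])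
      = PySem.Set.add (pvOffs26.map (pvG pt)) (pt.1, pt.2.1, pt.2.2.1) := by
    simp [PySem.Set.union, PySem.Set.update, PySem.Set.ofList]
  rw [hu, PySem.Set.add_of_not_mem (pvCentre_not_mem pt)]
  have hc : (pt.1, pt.2.1, pt.2.2.1) = pvG pt (0, 0, 0) := by simp [pvG]
  simp only [pvOffs27, List.map_append, hc, List.map]

theorem pvDiff_eq (point : Int × Int × Int × Int) (l : List (Int × Int × Int × Int)) :
    PySem.Set.diff (l.map (pvF point)) [point]
      = (l.filter (fun o => !decide (o = ((0 : Int), (0 : Int), (0 : Int), (0 : Int))))).map (pvF point) := by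
  have hd : PySem.Set.diff (l.map (pvF point)) [point]
      = (l.map (pvF point)).filter (fun x => !decide (x ∈ [point])) := by
    simp [PySem.Set.diff]
  rw [hd, List.filter_map]
  congr 1
  apply List.filter_congr
  intro o _
  simp only [Function.comp, List.mem_singleton]
  have h2 : (pvF point o = point) ↔ (o = ((0 : Int), (0 : Int), (0 : Int), (0 : Int))) := by
    constructor
    · intro h
      apply pvF_inj point
      rw [h]; simp [pvF]
    · rintro rfl; simp [pvF]
  simp [h2]

-- A's accumulated set is exactly the translated pvOffsA80
set_option maxHeartbeats 1600000 in
theorem pvA_elems (point : Int × Int × Int × Int) :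
    PySem.Set.diff
      ([(-1 : Int), 0, 1].foldl (fun res w_offset =>
        (PySem.Set.union (pvNeighbors (point.1, point.2.1, point.2.2.1))
          (PySem.Set.ofList [(point.1, point.2.1, point.2.2.1)])).foldl
          (fun r p => PySem.Set.add r (p.1, p.2.1, p.2.2, point.2.2.2 + w_offset)) res)
        PySem.Set.empty) [point]
      = pvOffsA80.map (pvF point) := by
  rw [pvTemplate_eq point]
  -- each w-layer of A's loop is the translated lift of pvOffs27
  have hmap : ∀ wo : Int, (pvOffs27.map (pvG point)).map
      (fun p => (p.1, p.2.1, p.2.2, point.2.2.2 + wo))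
      = (pvOffs27.map (pvLift wo)).map (pvF point) := by
    intro wo
    simp only [List.map_map]
    rfl
  have hinner : ∀ (wo : Int) (res : PySem.Set (Int × Int × Int × Int)),
      (pvOffs27.map (pvG point)).foldl
        (fun r p => PySem.Set.add r (p.1, p.2.1, p.2.2, point.2.2.2 + wo)) res
      = PySem.Set.update res ((pvOffs27.map (pvLift wo)).map (pvF point)) := by
    intro wo res
    rw [← hmap wo, PySem.Set.update_map_eq_foldl_add]
  simp only [List.foldl_cons, List.foldl_nil, hinner]
  have hnodup : ∀ wo : Int, ((pvOffs27.map (pvLift wo)).map (pvF point)).Nodup := by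
    intro wo
    refine List.Nodup.map (pvF_inj point) (List.Nodup.map ?_ (by decide : pvOffs27.Nodup))
    rintro ⟨a1, b1, c1⟩ ⟨a2, b2, c2⟩ h
    simp only [pvLift, Prod.mk.injEq] at h ⊢
    omega
  have hdisj : ∀ wo wo' : Int, wo ≠ wo' →
      ∀ x ∈ (pvOffs27.map (pvLift wo)).map (pvF point),
        x ∉ (pvOffs27.map (pvLift wo')).map (pvF point) := by
    intro wo wo' hne
    apply pvMap_disjoint
    intro o ho ho'
    obtain ⟨o3, _, rfl⟩ := List.mem_map.mp ho
    obtain ⟨o3', _, heq⟩ := List.mem_map.mp ho'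
    exact hne (congrArg (fun q => q.2.2.2) heq.symm)
  have h1 : PySem.Set.update PySem.Set.empty ((pvOffs27.map (pvLift (-1))).map (pvF point))
      = (pvOffs27.map (pvLift (-1))).map (pvF point) := by
    rw [PySem.Set.update_empty]
    exact PySem.Set.ofList_eq_self_of_nodup _ (hnodup (-1))
  rw [h1, PySem.Set.update_eq_append_of_disjoint _ _ (hnodup 0) (hdisj 0 (-1) (by norm_num)),
      PySem.Set.update_eq_append_of_disjoint _ _ (hnodup 1) (by
        intro x hx
        simp only [List.mem_append, not_or]
        exact ⟨hdisj 1 (-1) (by norm_num) x hx, hdisj 1 0 (by norm_num) x hx⟩)]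
  -- collapse the appended layers into one mapped offset list and perform the diff
  have hall : (pvOffs27.map (pvLift (-1))).map (pvF point) ++ (pvOffs27.map (pvLift 0)).map (pvF point)
        ++ (pvOffs27.map (pvLift 1)).map (pvF point)
      = (pvOffs27.map (pvLift (-1)) ++ pvOffs27.map (pvLift 0) ++ pvOffs27.map (pvLift 1)).map (pvF point) := by
    simp only [List.map_append]
  rw [hall]
  rw [pvDiff_eq point]
  exact congrArg (List.map (pvF point)) (by decide)

-- ===== VERDICT (by name: the statement is the Claim_ definition above) =====
theorem neighbors_4d_spec : Claim_equal_neighbors_4d := by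
  unfold Claim_equal_neighbors_4d
  intro point _
  unfold Spec_neighbors_4d neighbors_4d neighbors_4d_alt
  dsimp only
  rw [pvB_elems point, pvA_elems point]
  rw [PySem.Set.ofList_eq_self_of_nodup (List.map (pvF point) pvC80)
        ((by decide : pvC80.Nodup).map (pvF_inj point))]
  rw [pvCanon_map point pvOffsA80 (by decide), pvCanon_map point pvC80 (List.Perm.refl _)]
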